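-- pv_equiv track=rewrite | github.com/dzjxzyd/R-PeptideCutter | R-PeptideCutter_for_two_enzymes.py | chymo_high
-- ===== SOURCE A (Python) =====
-- def chymo_high(seq,seq_len):
--     cleavage=[]
--     for i in range(seq_len):
--         if i < seq_len-1:
--             if seq[i]=='F' or seq[i] == 'Y':
--                 if seq[i+1] != 'P':
--                     cleavage.append(i)
--             if seq[i]=='W' :
--                 if seq[i+1] != 'P' and seq[i] != 'M':
--                     cleavage.append(i)
--     return cleavage
-- ===== SOURCE B (Python) =====
-- def chymo_high(seq, seq_len):
--     s = seq[:max(seq_len, 0)]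
--     hits = []
--     for aa in 'FYW':
--         hits += [j for j, c in enumerate(s[:-1]) if c == aa and s[j + 1] != 'P']
--     return sorted(hits)
-- ===== Notes on version B (the rewrite author's own statement) =====
-- stated objective: alternative
-- what changed: Instead of A's single index loop with per-position branches, B makes one staged pass per residue letter ('F','Y','W'), collecting each letter's cleavage positions separately over the truncated sequence, then merges the three lists with a final sort; this is correct because positions of distinct letters are disjoint, so sorting restores A's index order.
import Mathlib
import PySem

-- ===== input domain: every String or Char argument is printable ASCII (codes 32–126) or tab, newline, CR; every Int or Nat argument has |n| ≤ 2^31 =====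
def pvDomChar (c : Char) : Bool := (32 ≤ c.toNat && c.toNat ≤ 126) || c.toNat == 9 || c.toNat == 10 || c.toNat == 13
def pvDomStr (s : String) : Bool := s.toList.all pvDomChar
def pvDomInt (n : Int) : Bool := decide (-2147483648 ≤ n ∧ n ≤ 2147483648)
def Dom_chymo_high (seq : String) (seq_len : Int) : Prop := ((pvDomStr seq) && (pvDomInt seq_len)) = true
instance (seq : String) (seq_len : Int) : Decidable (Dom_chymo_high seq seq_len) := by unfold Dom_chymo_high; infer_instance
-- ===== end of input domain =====

-- B replaces A's single index loop (separate F/Y and W branches per position) by one staged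
-- pass per letter of 'FYW' over the truncated sequence, merging the three per-letter
-- position lists with a final sort (alternative decomposition; same result).

-- ===== PORT A =====
def chymo_high (seq : String) (seq_len : Int) : List Int :=
  (PySem.List.pyRange 0 seq_len).foldl (fun cleavage i =>
    if i < seq_len - 1 then
      let cleavage :=
        if PySem.List.pyGetD seq.toList i ' ' = 'F' ∨ PySem.List.pyGetD seq.toList i ' ' = 'Y' then
          if PySem.List.pyGetD seq.toList (i + 1) ' ' ≠ 'P' then cleavage ++ [i] else cleavage
        else cleavage
      if PySem.List.pyGetD seq.toList i ' ' = 'W' then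
        if PySem.List.pyGetD seq.toList (i + 1) ' ' ≠ 'P' ∧ PySem.List.pyGetD seq.toList i ' ' ≠ 'M' then
          cleavage ++ [i]
        else cleavage
      else cleavage
    else cleavage) []

-- ===== PORT B =====
-- per-letter pass of Source B: [j for j, c in enumerate(s[:-1]) if c == aa and s[j+1] != 'P']
def pvHitsFor (s : List Char) (aa : Char) : List Int :=
  (PySem.List.enumerate (PySem.List.slice s none (some (-1)))).filterMap
    (fun p => if p.2 = aa ∧ PySem.List.pyGetD s (p.1 + 1) ' ' ≠ 'P' then some p.1 else none)

def chymo_high_alt (seq : String) (seq_len : Int) : List Int :=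
  let s := PySem.List.slice seq.toList none (some (max seq_len 0))
  let hits := ['F', 'Y', 'W'].foldl (fun hits aa => hits ++ pvHitsFor s aa) []
  PySem.List.sorted hits (fun x => x) false

-- ===== PRECONDITION & SPEC =====
-- Pre_ excludes exactly the inputs where A raises IndexError: seq_len ≥ len(seq)+2,
-- and seq_len = len(seq)+1 with a last character in 'FYW' (there A reads seq[i+1] out of range).
def Pre_chymo_high (seq : String) (seq_len : Int) : Prop :=
  seq_len ≤ seq.toList.length ∨
    (seq_len = seq.toList.length + 1 ∧ seq.toList.getLast? ≠ some 'F' ∧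
      seq.toList.getLast? ≠ some 'Y' ∧ seq.toList.getLast? ≠ some 'W')
instance (seq : String) (seq_len : Int) : Decidable (Pre_chymo_high seq seq_len) := by
  unfold Pre_chymo_high; infer_instance

def pvWitness_chymo_high : String × Int := ("FAWAYPX", 7)

def Spec_chymo_high (seq : String) (seq_len : Int) (out : List Int) : Prop := out = chymo_high_alt seq seq_len
instance (seq : String) (seq_len : Int) (out : List Int) : Decidable (Spec_chymo_high seq seq_len out) := by unfold Spec_chymo_high; infer_instance

-- ===== CLAIM (what is proved, stated in full; the proofs are below) =====
def Claim_equal_chymo_high : Prop := ∀ (seq : String) (seq_len : Int), Dom_chymo_high seq seq_len → Pre_chymo_high seq seq_len → Spec_chymo_high seq seq_len (chymo_high seq seq_len)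

-- ===== LEMMAS AND PROOFS =====

-- canonical form both ports are reduced to: indices j < |s|-1 with a hit at (s[j], s[j+1])
def pvCanon (s : List Char) : List Int :=
  ((List.range (s.length - 1)).filter
    (fun j => decide ((s.getD j ' ' = 'F' ∨ s.getD j ' ' = 'Y' ∨ s.getD j ' ' = 'W') ∧
      s.getD (j + 1) ' ' ≠ 'P'))).map (fun j : Nat => (j : Int))

lemma pvA_filter (seq : String) (L : Int) :
    chymo_high seq L =
      (PySem.List.pyRange 0 L).filter (fun i => decide (i < L - 1 ∧
        ((PySem.List.pyGetD seq.toList i ' ' = 'F' ∨ PySem.List.pyGetD seq.toList i ' ' = 'Y' ∨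
          PySem.List.pyGetD seq.toList i ' ' = 'W') ∧ PySem.List.pyGetD seq.toList (i + 1) ' ' ≠ 'P'))) := by
  unfold chymo_high
  have hbody : (fun (cleavage : List Int) (i : Int) =>
      if i < L - 1 then
        let cleavage :=
          if PySem.List.pyGetD seq.toList i ' ' = 'F' ∨ PySem.List.pyGetD seq.toList i ' ' = 'Y' then
            if PySem.List.pyGetD seq.toList (i + 1) ' ' ≠ 'P' then cleavage ++ [i] else cleavage
          else cleavage
        if PySem.List.pyGetD seq.toList i ' ' = 'W' then
          if PySem.List.pyGetD seq.toList (i + 1) ' ' ≠ 'P' ∧ PySem.List.pyGetD seq.toList i ' ' ≠ 'M' then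
            cleavage ++ [i]
          else cleavage
        else cleavage
      else cleavage)
      = (fun (cleavage : List Int) (i : Int) =>
          if (i < L - 1 ∧
            ((PySem.List.pyGetD seq.toList i ' ' = 'F' ∨ PySem.List.pyGetD seq.toList i ' ' = 'Y' ∨
              PySem.List.pyGetD seq.toList i ' ' = 'W') ∧ PySem.List.pyGetD seq.toList (i + 1) ' ' ≠ 'P'))
          then cleavage ++ [i] else cleavage) := by
    funext cl i
    split_ifs <;> simp_all
  rw [hbody, PySem.List.foldl_append_ite_eq_filter]
  simp

lemma pvFilterMap_if (s : List Char) (aa : Char) (l : List (Int × Char)) :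
    l.filterMap (fun p => if p.2 = aa ∧ PySem.List.pyGetD s (p.1 + 1) ' ' ≠ 'P' then some p.1 else none)
      = (l.filter (fun p => decide (p.2 = aa ∧ PySem.List.pyGetD s (p.1 + 1) ' ' ≠ 'P'))).map (fun p => p.1) := by
  induction l with
  | nil => rfl
  | cons x xs ih =>
    simp only [List.filterMap_cons, List.filter_cons, decide_eq_true_eq]
    split_ifs <;> simp [ih]

-- each per-letter pass of B is a filter of the index range
lemma pvHitsFor_eq (s : List Char) (aa : Char) :
    pvHitsFor s aa =
      ((List.range (s.length - 1)).filter
        (fun j => decide (s.getD j ' ' = aa ∧ s.getD (j + 1) ' ' ≠ 'P'))).map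
        (fun j : Nat => (j : Int)) := by
  unfold pvHitsFor
  rw [PySem.List.slice_to_neg_one, pvFilterMap_if s aa,
    PySem.List.enumerate_eq_map_pyRange s.dropLast ' ']
  have hlen : PySem.List.len s.dropLast = ((s.length - 1 : Nat) : Int) := by
    simp [PySem.List.len]
  rw [hlen, PySem.List.pyRange_zero_natCast, List.map_map, List.filter_map, List.map_map]
  simp only [Function.comp_def]
  refine congrArg _ (List.filter_congr ?_)
  intro j hj
  have hj' : j < s.length - 1 := List.mem_range.mp hj
  have hjd : j < s.dropLast.length := by simp; omega
  have e0 : PySem.List.pyGetD s.dropLast ((j : Nat) : Int) ' ' = s.getD j ' ' := by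
    rw [PySem.List.pyGetD_natCast, List.getD_eq_getElem _ _ hjd]
    have : j < s.length := by omega
    simp [List.getElem_dropLast, List.getD, List.getElem?_eq_getElem this]
  have e1 : PySem.List.pyGetD s (((j : Nat) : Int) + 1) ' ' = s.getD (j + 1) ' ' := by
    rw [show ((j : Nat) : Int) + 1 = (((j + 1 : Nat) : Nat) : Int) by push_cast; ring,
      PySem.List.pyGetD_natCast]
  rw [e0, e1]

-- appended filters under mutually exclusive predicates permute to the filter of the disjunction
lemma pvFilter_or_perm {α : Type} (l : List α) (p q : α → Bool)
    (h : ∀ x, ¬(p x = true ∧ q x = true)) :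
    (l.filter p ++ l.filter q).Perm (l.filter (fun x => p x || q x)) := by
  induction l with
  | nil => simp
  | cons x xs ih =>
    by_cases hp : p x = true
    · have hq : q x = false := by
        rcases Bool.eq_false_or_eq_true (q x) with h' | h'
        · exact absurd ⟨hp, h'⟩ (h x)
        · exact h'
      simp only [List.filter_cons, hp, hq, Bool.true_or, if_true]
      simpa using ih.cons x
    · have hp' : p x = false := by simpa using hp
      by_cases hq : q x = true
      · simp only [List.filter_cons, hp', hq, Bool.false_or, if_true]
        exact List.perm_middle.trans (ih.cons x)
      · have hq' : q x = false := by simpa using hq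
        simp only [List.filter_cons, hp', hq', Bool.false_or]
        exact ih

lemma pvCanon_pairwise (s : List Char) : (pvCanon s).Pairwise (· < ·) := by
  unfold pvCanon
  refine List.Pairwise.map _ (fun a b h => by exact_mod_cast h) ?_
  exact List.Pairwise.filter _ List.pairwise_lt_range

lemma pvB_canon (seq : String) (L : Int) :
    chymo_high_alt seq L = pvCanon (seq.toList.take (max L 0).toNat) := by
  unfold chymo_high_alt
  rw [PySem.List.slice_to seq.toList (le_max_right L 0)]
  set s : List Char := seq.toList.take (max L 0).toNat with hs
  simp only [List.foldl_cons, List.foldl_nil, List.nil_append]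
  rw [pvHitsFor_eq, pvHitsFor_eq, pvHitsFor_eq]
  set pF : Nat → Bool := fun j => decide (s.getD j ' ' = 'F' ∧ s.getD (j + 1) ' ' ≠ 'P') with hpF
  set pY : Nat → Bool := fun j => decide (s.getD j ' ' = 'Y' ∧ s.getD (j + 1) ' ' ≠ 'P') with hpY
  set pW : Nat → Bool := fun j => decide (s.getD j ' ' = 'W' ∧ s.getD (j + 1) ' ' ≠ 'P') with hpW
  set r : List Nat := List.range (s.length - 1) with hr
  have hperm : ((r.filter pF).map (fun j : Nat => (j : Int)) ++
      (r.filter pY).map (fun j : Nat => (j : Int)) ++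
      (r.filter pW).map (fun j : Nat => (j : Int))).Perm (pvCanon s) := by
    have h1 : (r.filter pF ++ r.filter pY).Perm (r.filter (fun j => pF j || pY j)) := by
      apply pvFilter_or_perm
      intro x hx
      simp only [hpF, hpY, decide_eq_true_eq] at hx
      obtain ⟨⟨e1, _⟩, ⟨e2, _⟩⟩ := hx
      rw [e1] at e2; exact absurd e2 (by decide)
    have h2 : ((r.filter (fun j => pF j || pY j)) ++ r.filter pW).Perm
        (r.filter (fun j => (pF j || pY j) || pW j)) := by
      apply pvFilter_or_perm
      intro x hx
      simp only [hpF, hpY, hpW, Bool.or_eq_true, decide_eq_true_eq] at hx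
      obtain ⟨h12, ⟨e3, _⟩⟩ := hx
      rcases h12 with ⟨e1, _⟩ | ⟨e2, _⟩
      · rw [e1] at e3; exact absurd e3 (by decide)
      · rw [e2] at e3; exact absurd e3 (by decide)
    have hpred : (fun j => (pF j || pY j) || pW j)
        = (fun j => decide ((s.getD j ' ' = 'F' ∨ s.getD j ' ' = 'Y' ∨ s.getD j ' ' = 'W') ∧
            s.getD (j + 1) ' ' ≠ 'P')) := by
      funext j
      simp only [hpF, hpY, hpW]
      rw [Bool.eq_iff_iff]
      simp only [Bool.or_eq_true, decide_eq_true_eq]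
      tauto
    have : (r.filter pF ++ r.filter pY ++ r.filter pW).Perm
        (r.filter (fun j => (pF j || pY j) || pW j)) :=
      ((h1.append_right (r.filter pW)).trans h2)
    have hm := this.map (fun j : Nat => (j : Int))
    rw [hpred] at hm
    simpa [pvCanon, List.map_append] using hm
  exact PySem.List.sorted_eq_of_perm_of_pairwise_lt _ _ _ hperm.symm (pvCanon_pairwise s)

lemma pvRangeFilter (K m : Nat) (p q : Nat → Bool) (hm : m ≤ K)
    (hp : ∀ j, m ≤ j → j < K → p j = false)
    (hq : ∀ j, j < m → p j = q j) :
    (List.range K).filter p = (List.range m).filter q := by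
  have hK : K = m + (K - m) := by omega
  rw [hK, List.range_add, List.filter_append]
  have h2 : ((List.range (K - m)).map (m + ·)).filter p = [] := by
    rw [List.filter_eq_nil_iff]
    intro a ha
    simp only [List.mem_map, List.mem_range] at ha
    obtain ⟨k, hk, rfl⟩ := ha
    simp [hp (m + k) (by omega) (by omega)]
  rw [h2, List.append_nil]
  exact List.filter_congr (fun j hj => hq j (List.mem_range.mp hj))

lemma pvA_canon (seq : String) (L : Int) (hpre : Pre_chymo_high seq L) :
    chymo_high seq L = pvCanon (seq.toList.take (max L 0).toNat) := by
  rw [pvA_filter]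
  by_cases hL : L ≤ 0
  · have h0 : (max L 0).toNat = 0 := by omega
    have hr : PySem.List.pyRange 0 L = [] := by
      rw [List.eq_nil_iff_forall_not_mem]
      intro x hx
      rw [PySem.List.mem_pyRange_one] at hx
      omega
    simp [pvCanon, h0, hr]
  · have h0L : (0 : Int) ≤ L := by omega
    obtain ⟨N, rfl⟩ := Int.eq_ofNat_of_zero_le h0L
    have hmax : (max ((N : Nat) : Int) 0).toNat = N := by omega
    rw [hmax, PySem.List.pyRange_zero_natCast, List.filter_map]
    unfold pvCanon
    unfold Pre_chymo_high at hpre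
    rcases hpre with h1 | ⟨h2, hF, hY, hW⟩
    · -- seq_len ≤ len(seq)
      have hN : N ≤ seq.toList.length := by omega
      have hslen : (seq.toList.take N).length = N := by rw [List.length_take]; omega
      rw [hslen]
      have hp : ∀ j, N - 1 ≤ j → j < N →
          ((fun i => decide (i < ((N : Nat) : Int) - 1 ∧
            ((PySem.List.pyGetD seq.toList i ' ' = 'F' ∨ PySem.List.pyGetD seq.toList i ' ' = 'Y' ∨
              PySem.List.pyGetD seq.toList i ' ' = 'W') ∧ PySem.List.pyGetD seq.toList (i + 1) ' ' ≠ 'P'))) ∘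
            (fun k : Nat => (k : Int))) j = false := by
        intro j hmj hjK
        simp only [Function.comp_def]
        rw [decide_eq_false_iff_not]
        rintro ⟨hlt, -⟩
        omega
      have hq : ∀ j, j < N - 1 →
          ((fun i => decide (i < ((N : Nat) : Int) - 1 ∧
            ((PySem.List.pyGetD seq.toList i ' ' = 'F' ∨ PySem.List.pyGetD seq.toList i ' ' = 'Y' ∨
              PySem.List.pyGetD seq.toList i ' ' = 'W') ∧ PySem.List.pyGetD seq.toList (i + 1) ' ' ≠ 'P'))) ∘
            (fun k : Nat => (k : Int))) j
          = (fun j => decide (((seq.toList.take N).getD j ' ' = 'F' ∨ (seq.toList.take N).getD j ' ' = 'Y' ∨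
              (seq.toList.take N).getD j ' ' = 'W') ∧ (seq.toList.take N).getD (j + 1) ' ' ≠ 'P')) j := by
        intro j hj
        simp only [Function.comp_def]
        have hj1 : j < N := by omega
        have hj2 : j + 1 < N := by omega
        have e1 : PySem.List.pyGetD seq.toList ((j : Nat) : Int) ' ' = seq.toList.getD j ' ' :=
          PySem.List.pyGetD_natCast seq.toList j ' '
        have e2 : PySem.List.pyGetD seq.toList (((j : Nat) : Int) + 1) ' ' = seq.toList.getD (j + 1) ' ' := by
          rw [show ((j : Nat) : Int) + 1 = (((j + 1 : Nat) : Nat) : Int) by push_cast; ring,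
            PySem.List.pyGetD_natCast]
        have e3 : (seq.toList.take N).getD j ' ' = seq.toList.getD j ' ' := by
          simp [List.getD, hj1]
        have e4 : (seq.toList.take N).getD (j + 1) ' ' = seq.toList.getD (j + 1) ' ' := by
          simp [List.getD, hj2]
        rw [e1, e2, e3, e4, decide_eq_decide]
        constructor
        · rintro ⟨-, h⟩; exact h
        · intro h; exact ⟨by omega, h⟩
      exact congrArg (List.map (fun k : Nat => (k : Int)))
        (pvRangeFilter N (N - 1) _ _ (by omega) hp hq)
    · -- seq_len = len(seq) + 1, last character not in 'FYW'
      have hN2 : N = seq.toList.length + 1 := by omega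
      have htake : seq.toList.take N = seq.toList := List.take_of_length_le (by omega)
      rw [htake]
      have hp : ∀ j, seq.toList.length - 1 ≤ j → j < N →
          ((fun i => decide (i < ((N : Nat) : Int) - 1 ∧
            ((PySem.List.pyGetD seq.toList i ' ' = 'F' ∨ PySem.List.pyGetD seq.toList i ' ' = 'Y' ∨
              PySem.List.pyGetD seq.toList i ' ' = 'W') ∧ PySem.List.pyGetD seq.toList (i + 1) ' ' ≠ 'P'))) ∘
            (fun k : Nat => (k : Int))) j = false := by
        intro j hmj hjK
        simp only [Function.comp_def]
        rw [decide_eq_false_iff_not]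
        by_cases hj : j = seq.toList.length
        · subst hj
          rintro ⟨hlt, -⟩
          omega
        · have hj1 : j = seq.toList.length - 1 := by omega
          have hlen1 : 1 ≤ seq.toList.length := by omega
          subst hj1
          rintro ⟨-, hc1, -⟩
          have hjlt : seq.toList.length - 1 < seq.toList.length := by omega
          have hlast : seq.toList.getLast? = some (seq.toList[seq.toList.length - 1]'hjlt) := by
            rw [List.getLast?_eq_getElem?, List.getElem?_eq_getElem hjlt]
          rw [PySem.List.pyGetD_natCast, List.getD_eq_getElem _ _ hjlt] at hc1
          rw [hlast] at hF hY hW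
          simp only [ne_eq, Option.some.injEq] at hF hY hW
          rcases hc1 with h | h | h
          · exact hF h
          · exact hY h
          · exact hW h
      have hq : ∀ j, j < seq.toList.length - 1 →
          ((fun i => decide (i < ((N : Nat) : Int) - 1 ∧
            ((PySem.List.pyGetD seq.toList i ' ' = 'F' ∨ PySem.List.pyGetD seq.toList i ' ' = 'Y' ∨
              PySem.List.pyGetD seq.toList i ' ' = 'W') ∧ PySem.List.pyGetD seq.toList (i + 1) ' ' ≠ 'P'))) ∘
            (fun k : Nat => (k : Int))) j
          = (fun j => decide ((seq.toList.getD j ' ' = 'F' ∨ seq.toList.getD j ' ' = 'Y' ∨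
              seq.toList.getD j ' ' = 'W') ∧ seq.toList.getD (j + 1) ' ' ≠ 'P')) j := by
        intro j hj
        simp only [Function.comp_def]
        have e1 : PySem.List.pyGetD seq.toList ((j : Nat) : Int) ' ' = seq.toList.getD j ' ' :=
          PySem.List.pyGetD_natCast seq.toList j ' '
        have e2 : PySem.List.pyGetD seq.toList (((j : Nat) : Int) + 1) ' ' = seq.toList.getD (j + 1) ' ' := by
          rw [show ((j : Nat) : Int) + 1 = (((j + 1 : Nat) : Nat) : Int) by push_cast; ring,
            PySem.List.pyGetD_natCast]
        rw [e1, e2, decide_eq_decide]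
        constructor
        · rintro ⟨-, h⟩; exact h
        · intro h; exact ⟨by omega, h⟩
      exact congrArg (List.map (fun k : Nat => (k : Int)))
        (pvRangeFilter N (seq.toList.length - 1) _ _ (by omega) hp hq)

-- ===== VERDICT (by name: the statement is the Claim_ definition above) =====
theorem chymo_high_spec : Claim_equal_chymo_high := by
  intro seq seq_len _ hpre
  unfold Spec_chymo_high
  rw [pvA_canon seq seq_len hpre, pvB_canon]
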